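-- pv_equiv track=rewrite | github.com/1289850360/IBI1_2023-24 | Practical 8/repetitive_counter.py | repeat_counts
-- ===== SOURCE A (Python) =====
-- def repeat_counts(seq):
--    repeat1 = 'GTGTGT'
--    repeat2 = 'GTCTGT'
--    count= 0
--    for i in range(len(seq)):
--        if seq[i:i+6]==repeat1 or seq[i:i+6]==repeat2:
--           count+=1
--
--    return count
-- ===== SOURCE B (Python) =====
-- def _count_jump(seq, pat):
--     count = 0
--     pos = seq.find(pat)
--     while pos != -1:
--         count += 1
--         pos = seq.find(pat, pos + 1)
--     return count
--
--
-- def repeat_counts(seq):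
--     return _count_jump(seq, 'GTGTGT') + _count_jump(seq, 'GTCTGT')
-- ===== Notes on version B (the rewrite author's own statement) =====
-- stated objective: faster
-- what changed: Replaces A's per-index scan (two 6-char slices and comparisons at every position) by two independent str.find-based jump loops, one per motif, that hop from occurrence to occurrence (restarting at pos+1 to keep overlaps) and sum the two counts.
import Mathlib
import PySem

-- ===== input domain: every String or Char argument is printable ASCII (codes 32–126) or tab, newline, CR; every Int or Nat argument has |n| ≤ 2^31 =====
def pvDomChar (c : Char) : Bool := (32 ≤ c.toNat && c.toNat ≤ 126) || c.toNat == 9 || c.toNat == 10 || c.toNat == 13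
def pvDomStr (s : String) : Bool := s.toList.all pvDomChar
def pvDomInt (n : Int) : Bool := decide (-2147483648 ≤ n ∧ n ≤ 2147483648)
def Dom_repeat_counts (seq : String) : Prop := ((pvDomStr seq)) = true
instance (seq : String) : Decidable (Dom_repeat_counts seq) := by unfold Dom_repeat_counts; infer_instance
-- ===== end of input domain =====

-- B replaces A's scan of every index (slicing twice per position) by two find-based jump
-- loops, one per motif, that hop directly from occurrence to occurrence (overlaps kept via pos+1).

-- ===== PORT A =====
def repeat_counts (seq : String) : Int :=
  let repeat1 := "GTGTGT"
  let repeat2 := "GTCTGT"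
  (PySem.List.pyRange 0 (PySem.Str.len seq) 1).foldl
    (fun count i =>
      if PySem.Str.slice seq (some i) (some (i + 6)) = repeat1 ∨
         PySem.Str.slice seq (some i) (some (i + 6)) = repeat2 then count + 1 else count) 0

-- ===== PORT B =====
-- the while loop of _count_jump, as fuel recursion (fuel = len+1 bounds the iteration count)
def countJump (seq pat : String) (fuel : Nat) (pos : Int) (count : Int) : Int :=
  match fuel with
  | 0 => count
  | f + 1 =>
    if pos = -1 then count
    else countJump seq pat f (PySem.Str.findFrom seq pat (pos + 1) none) (count + 1)

def countPat (seq pat : String) : Int :=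
  countJump seq pat (seq.toList.length + 1) (PySem.Str.find seq pat) 0

def repeat_counts_alt (seq : String) : Int :=
  countPat seq "GTGTGT" + countPat seq "GTCTGT"

-- ===== PRECONDITION & SPEC =====
def Spec_repeat_counts (seq : String) (out : Int) : Prop := out = repeat_counts_alt seq
instance (seq : String) (out : Int) : Decidable (Spec_repeat_counts seq out) := by unfold Spec_repeat_counts; infer_instance

-- ===== CLAIM (what is proved, stated in full; the proofs are below) =====
def Claim_equal_repeat_counts : Prop := ∀ (seq : String), Dom_repeat_counts seq → Spec_repeat_counts seq (repeat_counts seq)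

-- ===== LEMMAS AND PROOFS =====

-- number of occurrence positions of p in l at index ≥ k
def occ (l p : List Char) (k : Nat) : Int :=
  ((List.range' k (l.length - k)).countP (fun i => decide (p <+: l.drop i)) : Int)

lemma occ_eq_zero (l p : List Char) (k : Nat) (h : ¬ p <:+: l.drop k) : occ l p k = 0 := by
  unfold occ
  have hz : (List.range' k (l.length - k)).countP (fun i => decide (p <+: l.drop i)) = 0 := by
    rw [List.countP_eq_zero]
    intro i hi hpre
    rcases List.mem_range'.1 hi with ⟨j, _, rfl⟩
    simp only [decide_eq_true_eq] at hpre
    exact h (List.IsInfix.trans hpre.isInfix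
      (by simpa [List.drop_drop] using (List.drop_suffix (1 * j) (l.drop k)).isInfix))
  rw [hz]
  rfl

lemma occ_split (l p : List Char) (hp : p ≠ []) (k m : Nat) (hkm : k ≤ m)
    (hm : p <+: l.drop m) (hmin : ∀ i, k ≤ i → i < m → ¬ p <+: l.drop i) :
    occ l p k = 1 + occ l p (m + 1) := by
  have hmlen : m < l.length := by
    have h1 := hm.length_le
    have h2 : 0 < p.length := List.length_pos_iff.2 hp
    have := l.length_drop (i := m)
    omega
  unfold occ
  have hsplit : List.range' k (l.length - k)
      = List.range' k (m - k) ++ m :: List.range' (m + 1) (l.length - (m + 1)) := by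
    have h1 : List.range' m (l.length - m) = m :: List.range' (m + 1) (l.length - (m + 1)) := by
      have : l.length - m = (l.length - (m + 1)) + 1 := by omega
      rw [this, List.range'_succ]
    rw [← h1]
    have := List.range'_append (s := k) (m := m - k) (n := l.length - m) (step := 1)
    rw [show k + 1 * (m - k) = m by omega] at this
    rw [show (m - k) + (l.length - m) = l.length - k by omega] at this
    exact this.symm
  rw [hsplit]
  rw [List.countP_append, List.countP_cons]
  have hz : (List.range' k (m - k)).countP (fun i => decide (p <+: l.drop i)) = 0 := by
    rw [List.countP_eq_zero]
    intro i hi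
    rcases List.mem_range'.1 hi with ⟨j, hj, rfl⟩
    simpa using hmin (k + 1 * j) (by omega) (by omega)
  rw [hz]
  rw [decide_eq_true hm]
  push_cast
  simp
  ring

lemma jump_count (seq pat : String) (hp : pat.toList ≠ []) :
    ∀ (fuel k : Nat) (c : Int), seq.toList.length + 1 - k ≤ fuel → k ≤ seq.toList.length →
    countJump seq pat fuel (PySem.Str.findFrom seq pat (k : Int) none) c
      = c + occ seq.toList pat.toList k := by
  intro fuel
  induction fuel with
  | zero => intro k c hf hk; exfalso; omega
  | succ f ih =>
    intro k c hf hk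
    by_cases hr : PySem.Str.findFrom seq pat (k : Int) none = -1
    · rw [countJump, if_pos hr]
      have : ¬ pat.toList <:+: seq.toList.drop k := by
        have h1 := (PySem.Chars.findFrom_natCast_eq_neg_one_iff seq.toList pat.toList k hk).1
        simp only [PySem.Str.findFrom_eq] at hr
        exact h1 hr
      rw [occ_eq_zero _ _ _ this]; ring
    · have hr' : PySem.Chars.findFrom seq.toList pat.toList (k : Int) none ≠ -1 := by
        simpa [PySem.Str.findFrom_eq] using hr
      obtain ⟨hle, hpre, hmin⟩ :=
        PySem.Chars.findFrom_natCast_spec seq.toList pat.toList k hk hr'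
      set r : Int := PySem.Chars.findFrom seq.toList pat.toList (k : Int) none with hrdef
      have hr0 : 0 ≤ r := le_trans (by exact_mod_cast Int.natCast_nonneg k) hle
      have hrn : r.toNat < seq.toList.length := by
        have h1 := hpre.length_le
        have h2 : 0 < pat.toList.length := List.length_pos_iff.2 hp
        have := (seq.toList).length_drop (i := r.toNat)
        omega
      have hcast : r + 1 = ((r.toNat + 1 : Nat) : Int) := by omega
      have hS : PySem.Str.findFrom seq pat (k : Int) none = r := by
        rw [PySem.Str.findFrom_eq]
      rw [countJump, if_neg hr, hS, hcast]
      rw [ih (r.toNat + 1) (c + 1)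
        (by have hkr : k ≤ r.toNat := by omega
            omega) (by omega)]
      have hksplit : occ seq.toList pat.toList k = 1 + occ seq.toList pat.toList (r.toNat + 1) :=
        occ_split seq.toList pat.toList hp k r.toNat (by omega) hpre hmin
      rw [hksplit]; ring

lemma countPat_eq_occ (seq pat : String) (hp : pat.toList ≠ []) :
    countPat seq pat = occ seq.toList pat.toList 0 := by
  unfold countPat
  have h0 : PySem.Str.find seq pat = PySem.Str.findFrom seq pat ((0 : Nat) : Int) none := by
    simp [PySem.Str.findFrom_eq, PySem.Chars.findFrom_zero, PySem.Str.find]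
  rw [h0]
  have := jump_count seq pat hp (seq.toList.length + 1) 0 0 (by omega) (by omega)
  simpa using this

lemma countP_or_split {α : Type} (xs : List α) (p q : α → Bool)
    (h : ∀ x ∈ xs, ¬(p x = true ∧ q x = true)) :
    xs.countP (fun x => p x || q x) = xs.countP p + xs.countP q := by
  induction xs with
  | nil => simp
  | cons a xs ih =>
    simp only [List.countP_cons]
    rw [ih (fun x hx => h x (List.mem_cons_of_mem a hx))]
    have := h a (List.mem_cons_self)
    cases hpa : p a <;> cases hqa : q a <;> simp_all <;> omega

-- the match-at-i condition of A, as a prefix fact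
lemma slice_eq_iff_prefix (seq : String) (pat : String) (hp : pat.toList.length = 6) (j : Nat) :
    (PySem.Str.slice seq (some ((j : Nat) : Int)) (some (((j : Nat) : Int) + 6)) = pat)
      ↔ pat.toList <+: seq.toList.drop j := by
  rw [← String.toList_inj, PySem.Str.toList_slice]
  rw [show ((j : Nat) : Int) + 6 = (((j + 6 : Nat) : Nat) : Int) by push_cast; ring]
  simp only [PySem.Chars.slice_eq_listSlice, PySem.List.slice_natCast]
  rw [show j + 6 - j = 6 by omega]
  rw [List.prefix_iff_eq_take, hp]
  exact ⟨fun h => h.symm, fun h => h.symm⟩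

lemma A_eq_counts (seq : String) :
    repeat_counts seq = occ seq.toList "GTGTGT".toList 0 + occ seq.toList "GTCTGT".toList 0 := by
  unfold repeat_counts
  rw [show PySem.Str.len seq = ((seq.toList.length : Nat) : Int) by
    simp [PySem.Str.len_eq]]
  rw [PySem.List.pyRange_zero_natCast]
  have hfold := PySem.List.foldl_count_if
    (fun i : Int => decide (PySem.Str.slice seq (some i) (some (i + 6)) = "GTGTGT" ∨
        PySem.Str.slice seq (some i) (some (i + 6)) = "GTCTGT"))
    ((List.range seq.toList.length).map (fun k : Nat => (k : Int))) 0
  simp only [decide_eq_true_eq] at hfold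
  rw [hfold, List.countP_map]
  have hcong : List.countP
      ((fun i : Int => decide (PySem.Str.slice seq (some i) (some (i + 6)) = "GTGTGT" ∨
        PySem.Str.slice seq (some i) (some (i + 6)) = "GTCTGT")) ∘ (fun k : Nat => (k : Int)))
      (List.range seq.toList.length)
      = List.countP (fun j : Nat =>
          (decide ("GTGTGT".toList <+: seq.toList.drop j) ||
           decide ("GTCTGT".toList <+: seq.toList.drop j)))
      (List.range seq.toList.length) := by
    apply List.countP_congr
    intro j _
    simp only [Function.comp_apply, decide_eq_true_eq, Bool.or_eq_true]
    rw [slice_eq_iff_prefix seq "GTGTGT" (by decide) j,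
        slice_eq_iff_prefix seq "GTCTGT" (by decide) j]
  rw [hcong]
  rw [countP_or_split _ _ _ (by
    intro j _ ⟨h1, h2⟩
    simp only [decide_eq_true_eq] at h1 h2
    rw [List.prefix_iff_eq_take] at h1 h2
    have : "GTGTGT".toList = "GTCTGT".toList := by
      rw [h1, h2, show "GTGTGT".toList.length = "GTCTGT".toList.length from by decide]
    exact absurd this (by decide))]
  unfold occ
  rw [List.range_eq_range']
  push_cast
  simp

-- ===== VERDICT (by name: the statement is the Claim_ definition above) =====
theorem repeat_counts_spec : Claim_equal_repeat_counts := by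
  intro seq _
  unfold Spec_repeat_counts repeat_counts_alt
  rw [A_eq_counts seq,
    countPat_eq_occ seq "GTGTGT" (by decide),
    countPat_eq_occ seq "GTCTGT" (by decide)]
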